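-- pv_equiv track=rewrite | github.com/helloyogendra/python | Python/Coding_Challenges/Longest_arr.py | lotteryCoupons
-- ===== SOURCE A (Python) =====
-- def digit_sum(x):
--     return sum(int(d) for d in str(x))
--
-- def lotteryCoupons(n):
--     sum_count = {}
--
--     # Calculate sum of digits for each coupon and count occurrences
--     for i in range(1, n + 1):
--         s = digit_sum(i)
--         if s in sum_count:
--             sum_count[s] += 1
--         else:
--             sum_count[s] = 1
--
--     # Find the maximum frequency of any sum
--     max_frequency = max(sum_count.values())
--
--     # Count how many sums have this maximum frequency
--     max_count = sum(1 for count in sum_count.values() if count == max_frequency)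
--
--     return max_count
-- ===== SOURCE B (Python) =====
-- def _shift_add(dst, src, d):
--     for s, c in enumerate(src):
--         dst[s + d] += c
--
-- def _pair(v):
--     """(digit-sum distribution of 0..v, of 0..v-1), as count lists indexed by digit sum."""
--     if v < 10:
--         return [1] * (v + 1), [1] * v
--     m, r = divmod(v, 10)
--     gm, gp = _pair(m)                      # distributions for 0..m and 0..m-1
--     size = len(gm) + 9
--     dv, dp = [0] * size, [0] * size
--     for d in range(10):                    # d = last digit
--         _shift_add(dv, gm if d <= r else gp, d)
--         _shift_add(dp, gm if d < r else gp, d)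
--     return dv, dp
--
-- def lotteryCoupons(n):
--     dist, _ = _pair(n)
--     dist[0] -= 1                           # drop x = 0
--     best = max(dist)
--     return sum(1 for c in dist if c == best)
-- ===== Notes on version B (the rewrite author's own statement) =====
-- stated objective: faster
-- what changed: Replaced the per-coupon loop that string-converts every i in 1..n with a digit-DP recursion on n//10 that builds the whole digit-sum distribution of [0..n] in O(log^2 n).
-- outside the precondition, e.g. on lotteryCoupons(0): A raises ValueError, B returns 1; on lotteryCoupons(-3): A raises ValueError, B raises IndexError
import Mathlib
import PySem

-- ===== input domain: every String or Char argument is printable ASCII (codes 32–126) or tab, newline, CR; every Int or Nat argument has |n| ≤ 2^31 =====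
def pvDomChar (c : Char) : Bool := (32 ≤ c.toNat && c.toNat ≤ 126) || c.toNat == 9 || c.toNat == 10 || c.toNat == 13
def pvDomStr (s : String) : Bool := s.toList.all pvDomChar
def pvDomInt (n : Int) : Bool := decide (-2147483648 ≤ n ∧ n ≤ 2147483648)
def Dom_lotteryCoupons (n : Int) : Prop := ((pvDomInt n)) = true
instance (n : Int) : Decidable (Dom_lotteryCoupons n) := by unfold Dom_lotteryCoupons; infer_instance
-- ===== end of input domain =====

-- B replaces A's per-coupon loop over 1..n by a digit-DP recursion on n // 10 that
-- computes the whole digit-sum distribution of [0..n] at once (objective: faster).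


-- ===== PORT A =====
-- digit_sum(x) = sum(int(d) for d in str(x)); int(d) ported via ofChars? with a default
-- that is never hit for the x >= 1 this is applied to (str(x) yields digit chars only).
def pvDigitSum (x : Int) : Int :=
  ((PySem.Int.toChars x).map (fun d => (PySem.Int.ofChars? [d]).getD 0)).sum

def lotteryCoupons (n : Int) : Int :=
  let d := (PySem.List.pyRange 1 (n + 1) 1).foldl (fun (d : PySem.Dict Int Int) i =>
      let s := pvDigitSum i
      match PySem.Dict.get? d s with
      | some c => PySem.Dict.insert d s (c + 1)
      | none => PySem.Dict.insert d s 1) PySem.Dict.empty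
  -- max(sum_count.values()): the .getD 0 branch is the empty-values case excluded by Pre_
  let maxFrequency := (PySem.List.max? (PySem.Dict.values d) (fun v => v)).getD 0
  ((PySem.Dict.values d).countP (fun c => c == maxFrequency) : Int)

-- ===== PORT B =====
-- _shift_add(dst, src, d): for s, c in enumerate(src): dst[s + d] += c  (index s + d kept as one counter)
def pvShiftAdd : List Int → List Int → Nat → List Int
  | dst, [], _ => dst
  | dst, c :: rest, i => pvShiftAdd (dst.set i (dst.getD i 0 + c)) rest (i + 1)

-- _pair(v): (digit-sum distribution of 0..v, of 0..v-1), as count lists indexed by digit sum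
def pvPair (v : Int) : List Int × List Int :=
  if h : v < 10 then (List.replicate (v + 1).toNat 1, List.replicate v.toNat 1)
  else
    let m := PySem.Int.floordiv v 10
    let r := PySem.Int.mod v 10
    let p := pvPair m
    let size := p.1.length + 9
    (PySem.List.pyRange 0 10 1).foldl (fun (acc : List Int × List Int) d =>
        (pvShiftAdd acc.1 (if d ≤ r then p.1 else p.2) d.toNat,
         pvShiftAdd acc.2 (if d < r then p.1 else p.2) d.toNat))
      (List.replicate size (0 : Int), List.replicate size (0 : Int))
termination_by v.toNat
decreasing_by
  simp only [PySem.Int.floordiv_eq_ediv_of_pos (by omega : (0:Int) < 10)]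
  omega

def lotteryCoupons_alt (n : Int) : Int :=
  let g := (pvPair n).1
  let g2 := g.set 0 (g.getD 0 0 - 1)    -- dist[0] -= 1 : drop x = 0
  let best := (PySem.List.max? g2 (fun c => c)).getD 0
  (g2.countP (fun c => c == best) : Int)

-- ===== PRECONDITION & SPEC =====
-- A raises ValueError (max() of the empty values list) exactly when n < 1; those inputs are excluded.
def Pre_lotteryCoupons (n : Int) : Prop := 1 ≤ n
instance (n : Int) : Decidable (Pre_lotteryCoupons n) := by unfold Pre_lotteryCoupons; infer_instance
def pvWitness_lotteryCoupons : Int := 12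

def Spec_lotteryCoupons (n : Int) (out : Int) : Prop := out = lotteryCoupons_alt n
instance (n : Int) (out : Int) : Decidable (Spec_lotteryCoupons n out) := by unfold Spec_lotteryCoupons; infer_instance

-- ===== CLAIM (what is proved, stated in full; the proofs are below) =====
def Claim_equal_lotteryCoupons : Prop := ∀ (n : Int), Dom_lotteryCoupons n → Pre_lotteryCoupons n → Spec_lotteryCoupons n (lotteryCoupons n)

-- ===== LEMMAS AND PROOFS =====

def pvS (x : Nat) : Nat := if x = 0 then 0 else x % 10 + pvS (x / 10)

lemma pvS_zero : pvS 0 = 0 := by simp [pvS]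

lemma pvS_small {x : Nat} (h : x < 10) : pvS x = x := by
  rw [pvS]
  rcases Nat.eq_zero_or_pos x with h0 | h0
  · simp [h0]
  · rw [if_neg (by omega)]
    have h1 : x / 10 = 0 := by omega
    rw [h1, pvS_zero, Nat.mod_eq_of_lt h]
    omega

lemma pvS_split {q d : Nat} (h : d < 10) : pvS (10 * q + d) = pvS q + d := by
  rcases Nat.eq_zero_or_pos (10 * q + d) with h0 | h0
  · have hq : q = 0 := by omega
    have hd : d = 0 := by omega
    simp [hq, hd, pvS_zero]
  · rw [pvS, if_neg (by omega)]
    have h1 : (10 * q + d) % 10 = d := by omega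
    have h2 : (10 * q + d) / 10 = q := by omega
    rw [h1, h2]; omega

lemma charVal_digitChar {k : Nat} (h : k < 10) :
    (PySem.Int.ofChars? [Nat.digitChar k]).getD 0 = (k : Int) := by
  interval_cases k <;> decide

lemma toDigitsCore_sum : ∀ (f m : Nat) (ds : List Char), m < f →
    ((Nat.toDigitsCore 10 f m ds).map (fun d => (PySem.Int.ofChars? [d]).getD 0)).sum
      = (pvS m : Int) + ((ds.map (fun d => (PySem.Int.ofChars? [d]).getD 0)).sum) := by
  intro f
  induction f with
  | zero => intro m ds h; omega
  | succ f ih =>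
    intro m ds h
    rw [Nat.toDigitsCore]
    by_cases h0 : m / 10 = 0
    · simp only [h0, if_pos, List.map_cons, List.sum_cons]
      rw [charVal_digitChar (by omega : m % 10 < 10)]
      have : pvS m = m % 10 := by
        rcases Nat.eq_zero_or_pos m with h1 | h1
        · simp [h1, pvS_zero]
        · rw [pvS, if_neg (by omega), h0, pvS_zero]
          omega
      rw [this]
    · rw [if_neg h0]
      rw [ih (m / 10) _ (by omega)]
      simp only [List.map_cons, List.sum_cons]
      rw [charVal_digitChar (by omega : m % 10 < 10)]
      have : pvS m = m % 10 + pvS (m / 10) := by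
        rw [pvS, if_neg (by omega)]
      rw [this]; push_cast; ring

lemma pvDigitSum_eq {x : Int} (h : 0 ≤ x) : pvDigitSum x = (pvS x.toNat : Int) := by
  unfold pvDigitSum PySem.Int.toChars
  rw [if_neg (by omega)]
  rw [Nat.toDigits, toDigitsCore_sum _ _ _ (by omega)]
  simp

def pvCnt (v s : Nat) : Nat := (List.range v).countP (fun x => pvS x == s)

lemma pvCnt_zero (s : Nat) : pvCnt 0 s = 0 := by simp [pvCnt]

lemma pvCnt_succ (v s : Nat) : pvCnt (v + 1) s = pvCnt v s + (if pvS v = s then 1 else 0) := by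
  simp [pvCnt, List.range_succ, List.countP_append, List.countP_cons]

lemma pvCnt_small {v : Nat} (h : v ≤ 10) (s : Nat) : pvCnt v s = if s < v then 1 else 0 := by
  induction v with
  | zero => simp [pvCnt_zero]
  | succ v ih =>
    rw [pvCnt_succ, ih (by omega), pvS_small (by omega)]
    split_ifs <;> omega

lemma countP_range_eq_sum (k : Nat) (p : Nat → Bool) :
    (List.range k).countP p = ∑ d ∈ Finset.range k, if p d then 1 else 0 := by
  induction k with
  | zero => simp
  | succ k ih =>
    rw [List.range_succ, List.countP_append, ih, Finset.sum_range_succ]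
    simp [List.countP_cons]

lemma pvCnt_step (m : Nat) : ∀ (r : Nat), r ≤ 10 → ∀ (s : Nat),
    pvCnt (10 * m + r) s = (∑ d ∈ Finset.range 10, if d ≤ s then pvCnt m (s - d) else 0)
                         + (∑ d ∈ Finset.range r, if pvS m + d = s then 1 else 0) := by
  induction m with
  | zero =>
    intro r hr s
    rw [(by omega : 10 * 0 + r = r), pvCnt_small hr]
    have h1 : (∑ d ∈ Finset.range 10, if d ≤ s then pvCnt 0 (s - d) else 0) = 0 :=
      Finset.sum_eq_zero (by intro d _; simp [pvCnt_zero])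
    have h2 : (∑ d ∈ Finset.range r, if pvS 0 + d = s then 1 else 0)
        = if s < r then 1 else 0 := by
      simp only [pvS_zero, Nat.zero_add]
      rw [Finset.sum_ite_eq' (Finset.range r) s (fun _ => 1)]
      simp [Finset.mem_range]
    rw [h1, h2]; omega
  | succ m ih =>
    intro r hr s
    have hL : pvCnt (10 * (m + 1) + r) s
        = pvCnt (10 * m + r) s
          + ∑ d ∈ Finset.range 10, if pvS (10 * m + r + d) = s then 1 else 0 := by
      rw [(by omega : 10 * (m + 1) + r = (10 * m + r) + 10)]
      unfold pvCnt
      rw [List.range_add, List.countP_append, List.countP_map]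
      simp only [Function.comp_def]
      rw [countP_range_eq_sum 10 (fun x => pvS (10 * m + r + x) == s)]
      congr 1
      apply Finset.sum_congr rfl
      intro d _
      simp
    have hp1 : (∑ d ∈ Finset.Ico 0 (10 - r), if pvS (10 * m + r + d) = s then 1 else 0)
        = ∑ d ∈ Finset.Ico r 10, if pvS m + d = s then 1 else 0 := by
      rw [Finset.sum_Ico_eq_sum_range, Finset.sum_Ico_eq_sum_range]
      apply Finset.sum_congr (by rw [(by omega : 10 - r - 0 = 10 - r)])
      intro i hi
      simp only [Finset.mem_range] at hi
      have e : 10 * m + r + (0 + i) = 10 * m + (r + i) := by omega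
      rw [e, pvS_split (by omega)]
    have hp2 : (∑ d ∈ Finset.Ico (10 - r) 10, if pvS (10 * m + r + d) = s then 1 else 0)
        = ∑ d ∈ Finset.range r, if pvS (m + 1) + d = s then 1 else 0 := by
      rw [Finset.sum_Ico_eq_sum_range, (by omega : 10 - (10 - r) = r)]
      apply Finset.sum_congr rfl
      intro i hi
      simp only [Finset.mem_range] at hi
      have e : 10 * m + r + (10 - r + i) = 10 * (m + 1) + i := by omega
      rw [e, pvS_split (by omega)]
    have hsplit : (∑ d ∈ Finset.range 10, if pvS (10 * m + r + d) = s then 1 else 0)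
        = (∑ d ∈ Finset.Ico 0 (10 - r), if pvS (10 * m + r + d) = s then 1 else 0)
          + ∑ d ∈ Finset.Ico (10 - r) 10, if pvS (10 * m + r + d) = s then 1 else 0 := by
      rw [Finset.range_eq_Ico,
        ← Finset.sum_Ico_consecutive (fun d => if pvS (10 * m + r + d) = s then 1 else 0)
          (show (0:Nat) ≤ 10 - r by omega) (show 10 - r ≤ 10 by omega)]
    have hcons : (∑ d ∈ Finset.range r, if pvS m + d = s then 1 else 0)
          + (∑ d ∈ Finset.Ico r 10, if pvS m + d = s then 1 else 0)
        = ∑ d ∈ Finset.range 10, if pvS m + d = s then 1 else 0 := by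
      rw [Finset.range_eq_Ico]
      exact Finset.sum_Ico_consecutive _ (by omega) (by omega)
    have hsucc : (∑ d ∈ Finset.range 10, if d ≤ s then pvCnt (m + 1) (s - d) else 0)
        = (∑ d ∈ Finset.range 10, if d ≤ s then pvCnt m (s - d) else 0)
          + ∑ d ∈ Finset.range 10, if pvS m + d = s then 1 else 0 := by
      rw [← Finset.sum_add_distrib]
      apply Finset.sum_congr rfl
      intro d _
      rw [pvCnt_succ]
      split_ifs with h1 h2 h3 <;> omega
    rw [hL, ih r hr s, hsucc, hsplit, hp1, hp2]
    omega

lemma length_pvShiftAdd (src : List Int) : ∀ (dst : List Int) (i : Nat),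
    (pvShiftAdd dst src i).length = dst.length := by
  induction src with
  | nil => intro dst i; rfl
  | cons c rest ih =>
    intro dst i
    show (pvShiftAdd (dst.set i (dst.getD i 0 + c)) rest (i + 1)).length = _
    rw [ih, List.length_set]

lemma getD_set_int (l : List Int) (i : Nat) (v : Int) (j : Nat) (hi : i < l.length) :
    (l.set i v).getD j 0 = if j = i then v else l.getD j 0 := by
  rcases Nat.lt_or_ge j l.length with hj | hj
  · rw [List.getD_eq_getElem _ _ (by simpa using hj), List.getD_eq_getElem _ _ hj,
      List.getElem_set]
    by_cases hij : i = j
    · rw [if_pos hij, if_pos hij.symm]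
    · rw [if_neg hij, if_neg (fun hh => hij hh.symm)]
  · rw [List.getD_eq_default _ _ (by simpa using hj), List.getD_eq_default _ _ hj,
      if_neg (by omega)]

lemma getD_pvShiftAdd (src : List Int) : ∀ (dst : List Int) (i : Nat),
    i + src.length ≤ dst.length → ∀ (j : Nat),
    (pvShiftAdd dst src i).getD j 0
      = dst.getD j 0 + (if i ≤ j ∧ j - i < src.length then src.getD (j - i) 0 else 0) := by
  induction src with
  | nil =>
    intro dst i _ j
    show dst.getD j 0 = _
    simp
  | cons c rest ih =>
    intro dst i h j
    show (pvShiftAdd (dst.set i (dst.getD i 0 + c)) rest (i + 1)).getD j 0 = _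
    rw [ih _ (i + 1) (by simp [List.length_set]; simp at h; omega) j]
    rw [getD_set_int dst i _ j (by simp at h ⊢; omega)]
    by_cases hji : j = i
    · rw [if_pos hji,
        if_neg (show ¬(i + 1 ≤ j ∧ j - (i + 1) < rest.length) by omega),
        if_pos (show i ≤ j ∧ j - i < (c :: rest).length by
          simp only [List.length_cons]; omega)]
      rw [hji, Nat.sub_self]
      simp
    · rw [if_neg hji]
      by_cases hle : i + 1 ≤ j ∧ j - (i + 1) < rest.length
      · rw [if_pos hle,
          if_pos (show i ≤ j ∧ j - i < (c :: rest).length by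
            simp only [List.length_cons]; omega)]
        have hj : j - i = (j - (i + 1)) + 1 := by omega
        rw [hj]
        simp
      · rw [if_neg hle,
          if_neg (show ¬(i ≤ j ∧ j - i < (c :: rest).length) by
            simp only [List.length_cons]; omega)]

lemma getD_foldl_shiftAdd (srcf : Int → List Int) (l : List Int) : ∀ (dst : List Int),
    (∀ d ∈ l, d.toNat + (srcf d).length ≤ dst.length) → ∀ (j : Nat),
    ((l.foldl (fun a d => pvShiftAdd a (srcf d) d.toNat) dst).getD j 0
      = dst.getD j 0 + (l.map (fun d => if d.toNat ≤ j ∧ j - d.toNat < (srcf d).length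
          then (srcf d).getD (j - d.toNat) 0 else 0)).sum) := by
  induction l with
  | nil => intro dst _ j; simp
  | cons d t ih =>
    intro dst h j
    simp only [List.foldl_cons, List.map_cons, List.sum_cons]
    rw [ih _ (by intro e he; rw [length_pvShiftAdd]; exact h e (by simp [he])) j]
    rw [getD_pvShiftAdd _ _ _ (h d (by simp)) j]
    ring

lemma length_foldl_shiftAdd (srcf : Int → List Int) (l : List Int) : ∀ (dst : List Int),
    (l.foldl (fun a d => pvShiftAdd a (srcf d) d.toNat) dst).length = dst.length := by
  induction l with
  | nil => intro dst; rfl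
  | cons d t ih => intro dst; rw [List.foldl_cons, ih, length_pvShiftAdd]

lemma getD_replicate_int (k j : Nat) (a : Int) :
    (List.replicate k a).getD j 0 = if j < k then a else 0 := by
  rcases Nat.lt_or_ge j k with h | h
  · rw [List.getD_eq_getElem _ _ (by simpa using h), List.getElem_replicate, if_pos h]
  · rw [List.getD_eq_default _ _ (by simpa using h), if_neg (by omega)]

lemma sum_map_pyRange10 (F : Int → Int) :
    ((PySem.List.pyRange 0 10 1).map F).sum = ∑ d ∈ Finset.range 10, F (d : Int) := by
  rw [show PySem.List.pyRange 0 10 1 = [0, 1, 2, 3, 4, 5, 6, 7, 8, 9] from by decide]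
  simp [Finset.sum_range_succ]
  ring

lemma dp_sum (a b s : Nat) (hb : b ≤ 10) :
    (∑ d ∈ Finset.range 10, if d ≤ s then (if d < b then pvCnt (a + 1) (s - d) else pvCnt a (s - d)) else 0)
      = pvCnt (10 * a + b) s := by
  rw [pvCnt_step a b hb s]
  have h1 : ∀ d ∈ Finset.range 10,
      (if d ≤ s then (if d < b then pvCnt (a + 1) (s - d) else pvCnt a (s - d)) else 0)
        = (if d ≤ s then pvCnt a (s - d) else 0)
          + (if d ≤ s ∧ d < b then (if pvS a = s - d then 1 else 0) else 0) := by
    intro d _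
    by_cases h2 : d ≤ s
    · rw [if_pos h2, if_pos h2]
      by_cases h3 : d < b
      · rw [if_pos h3, if_pos ⟨h2, h3⟩, pvCnt_succ]
      · rw [if_neg h3, if_neg (fun hh => h3 hh.2)]
        omega
    · rw [if_neg h2, if_neg h2, if_neg (fun hh => h2 hh.1)]
  rw [Finset.sum_congr rfl h1, Finset.sum_add_distrib]
  congr 1
  have h2 : (∑ d ∈ Finset.range b, if d ≤ s ∧ d < b then (if pvS a = s - d then 1 else 0) else 0)
      = ∑ d ∈ Finset.range 10, if d ≤ s ∧ d < b then (if pvS a = s - d then 1 else 0) else 0 := by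
    apply Finset.sum_subset (by intro x hx; simp only [Finset.mem_range] at *; omega)
    intro x _ hx
    simp only [Finset.mem_range] at hx
    rw [if_neg (fun hh => hx hh.2)]
  rw [← h2]
  apply Finset.sum_congr rfl
  intro d hd
  simp only [Finset.mem_range] at hd
  by_cases h3 : d ≤ s
  · rw [if_pos ⟨h3, hd⟩]
    split_ifs <;> omega
  · rw [if_neg (fun hh => h3 hh.1), if_neg (by omega)]

lemma pvPair_base {v : Int} (h0 : 0 ≤ v) (hv : v < 10) :
    (pvPair v).2.length ≤ (pvPair v).1.length
    ∧ (∀ s : Nat, (pvPair v).1.getD s 0 = (pvCnt (v.toNat + 1) s : Int))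
    ∧ (∀ s : Nat, (pvPair v).2.getD s 0 = (pvCnt v.toNat s : Int)) := by
  rw [pvPair, dif_pos hv]
  refine ⟨by simp only [List.length_replicate]; omega, ?_, ?_⟩
  · intro s
    rw [getD_replicate_int, pvCnt_small (by omega) s, show (v + 1).toNat = v.toNat + 1 by omega]
    split_ifs <;> simp
  · intro s
    rw [getD_replicate_int, pvCnt_small (by omega) s]
    split_ifs <;> simp


lemma fold_eval (gm gp : List Int) (hlen : gp.length ≤ gm.length) (a : Nat)
    (ih1 : ∀ s : Nat, gm.getD s 0 = (pvCnt (a + 1) s : Int))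
    (ih2 : ∀ s : Nat, gp.getD s 0 = (pvCnt a s : Int))
    (P : Int → Prop) [DecidablePred P] (b : Nat) (hb : b ≤ 10)
    (hP : ∀ d : Nat, d < 10 → (P (d : Int) ↔ d < b)) (s : Nat) :
    ((PySem.List.pyRange 0 10 1).foldl
        (fun x d => pvShiftAdd x (if P d then gm else gp) d.toNat)
        (List.replicate (gm.length + 9) 0)).getD s 0 = (pvCnt (10 * a + b) s : Int) := by
  rw [getD_foldl_shiftAdd (fun d => if P d then gm else gp) _ _ ?hb s]
  case hb =>
    intro d hd
    rw [PySem.List.mem_pyRange_one] at hd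
    simp only [List.length_replicate]
    split_ifs <;> omega
  rw [getD_replicate_int, ite_self, zero_add, sum_map_pyRange10]
  have hterm : ∀ d ∈ Finset.range 10,
      (if ((d : Int)).toNat ≤ s ∧ s - ((d : Int)).toNat < (if P (d : Int) then gm else gp).length
        then (if P (d : Int) then gm else gp).getD (s - ((d : Int)).toNat) 0 else 0)
      = (if d ≤ s then (if d < b then (pvCnt (a + 1) (s - d) : Int) else (pvCnt a (s - d) : Int)) else 0) := by
    intro d hd
    simp only [Finset.mem_range] at hd
    simp only [Int.toNat_natCast]
    by_cases hds : d ≤ s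
    · rw [if_pos hds]
      by_cases hsel : P (d : Int)
      · rw [if_pos hsel, if_pos ((hP d hd).mp hsel)]
        by_cases hl : s - d < gm.length
        · rw [if_pos ⟨hds, hl⟩, ih1]
        · rw [if_neg (fun hh => hl hh.2), ← ih1 (s - d),
            List.getD_eq_default _ _ (by omega)]
      · rw [if_neg hsel, if_neg (fun hh : d < b => hsel ((hP d hd).mpr hh))]
        by_cases hl : s - d < gp.length
        · rw [if_pos ⟨hds, hl⟩, ih2]
        · rw [if_neg (fun hh => hl hh.2), ← ih2 (s - d),
            List.getD_eq_default _ _ (by omega)]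
    · rw [if_neg hds, if_neg (fun hh => hds hh.1)]
  rw [Finset.sum_congr rfl hterm, ← dp_sum a b s hb]
  push_cast
  rfl

lemma pvPair_spec : ∀ (N : Nat) (v : Int), 0 ≤ v → v.toNat ≤ N →
    (pvPair v).2.length ≤ (pvPair v).1.length
    ∧ (∀ s : Nat, (pvPair v).1.getD s 0 = (pvCnt (v.toNat + 1) s : Int))
    ∧ (∀ s : Nat, (pvPair v).2.getD s 0 = (pvCnt v.toNat s : Int)) := by
  intro N
  induction N with
  | zero => intro v h0 hN; exact pvPair_base h0 (by omega)
  | succ N ih =>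
    intro v h0 hN
    by_cases hv : v < 10
    · exact pvPair_base h0 hv
    · -- step case
      have hmod : PySem.Int.mod v 10 = v % 10 := PySem.Int.mod_eq_emod_of_pos (by omega)
      have hdiv : PySem.Int.floordiv v 10 = v / 10 := PySem.Int.floordiv_eq_ediv_of_pos (by omega)
      have hm0 : (0:Int) ≤ v / 10 := by omega
      have hmN : (v / 10).toNat ≤ N := by omega
      obtain ⟨ihlen, ih1, ih2⟩ := ih (v / 10) hm0 hmN
      have hunf : pvPair v
          = ((PySem.List.pyRange 0 10 1).foldl
              (fun x d => pvShiftAdd x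
                (if d ≤ v % 10 then (pvPair (v / 10)).1 else (pvPair (v / 10)).2) d.toNat)
              (List.replicate ((pvPair (v / 10)).1.length + 9) 0),
            (PySem.List.pyRange 0 10 1).foldl
              (fun x d => pvShiftAdd x
                (if d < v % 10 then (pvPair (v / 10)).1 else (pvPair (v / 10)).2) d.toNat)
              (List.replicate ((pvPair (v / 10)).1.length + 9) 0)) := by
        conv_lhs => rw [pvPair]
        rw [dif_neg hv, hdiv, hmod]
        show List.foldl (fun acc d =>
            (pvShiftAdd acc.1 (if d ≤ v % 10 then (pvPair (v / 10)).1 else (pvPair (v / 10)).2) d.toNat,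
             pvShiftAdd acc.2 (if d < v % 10 then (pvPair (v / 10)).1 else (pvPair (v / 10)).2) d.toNat))
          (List.replicate ((pvPair (v / 10)).1.length + 9) 0,
           List.replicate ((pvPair (v / 10)).1.length + 9) 0) (PySem.List.pyRange 0 10 1) = _
        exact PySem.List.foldl_prod_mk
          (fun x d => pvShiftAdd x (if d ≤ v % 10 then (pvPair (v / 10)).1 else (pvPair (v / 10)).2) d.toNat)
          (fun x d => pvShiftAdd x (if d < v % 10 then (pvPair (v / 10)).1 else (pvPair (v / 10)).2) d.toNat)
          (PySem.List.pyRange 0 10 1) _ _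
      have h1 : ∀ s : Nat, (pvPair v).1.getD s 0 = (pvCnt (v.toNat + 1) s : Int) := by
        intro s
        rw [hunf]
        have := fold_eval (pvPair (v / 10)).1 (pvPair (v / 10)).2 ihlen (v / 10).toNat ih1 ih2
          (fun d => d ≤ v % 10) (v.toNat % 10 + 1) (by omega)
          (by intro d hd; constructor <;> (intro; omega)) s
        rw [show 10 * (v / 10).toNat + (v.toNat % 10 + 1) = v.toNat + 1 by omega] at this
        exact this
      have h2 : ∀ s : Nat, (pvPair v).2.getD s 0 = (pvCnt v.toNat s : Int) := by
        intro s
        rw [hunf]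
        have := fold_eval (pvPair (v / 10)).1 (pvPair (v / 10)).2 ihlen (v / 10).toNat ih1 ih2
          (fun d => d < v % 10) (v.toNat % 10) (by omega)
          (by intro d hd; constructor <;> (intro; omega)) s
        rw [show 10 * (v / 10).toNat + v.toNat % 10 = v.toNat by omega] at this
        exact this
      refine ⟨?_, h1, h2⟩
      rw [hunf]
      simp only [length_foldl_shiftAdd]
      exact le_refl _

lemma lotA_counter (n : Int) :
    lotteryCoupons n =
      ((PySem.Dict.counter ((PySem.List.pyRange 1 (n + 1) 1).map pvDigitSum)).values.countP
        (fun c => c ==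
          (PySem.List.max?
            (PySem.Dict.counter ((PySem.List.pyRange 1 (n + 1) 1).map pvDigitSum)).values
            (fun v => v)).getD 0) : Int) := by
  have hcg : ∀ (acc : PySem.Dict Int Int) (i : Int), i ∈ PySem.List.pyRange 1 (n + 1) 1 →
      (let s := pvDigitSum i
       match PySem.Dict.get? acc s with
       | some c => PySem.Dict.insert acc s (c + 1)
       | none => PySem.Dict.insert acc s 1)
      = PySem.Dict.insert acc (pvDigitSum i) (PySem.Dict.getD acc (pvDigitSum i) 0 + 1) := by
    intro acc i _
    show (match PySem.Dict.get? acc (pvDigitSum i) with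
          | some c => PySem.Dict.insert acc (pvDigitSum i) (c + 1)
          | none => PySem.Dict.insert acc (pvDigitSum i) 1) = _
    cases h : PySem.Dict.get? acc (pvDigitSum i) with
    | none => simp [PySem.Dict.getD_eq_get?_getD, h]
    | some c => simp [PySem.Dict.getD_eq_get?_getD, h]
  have hfold : (PySem.List.pyRange 1 (n + 1) 1).foldl (fun (d : PySem.Dict Int Int) i =>
      let s := pvDigitSum i
      match PySem.Dict.get? d s with
      | some c => PySem.Dict.insert d s (c + 1)
      | none => PySem.Dict.insert d s 1) PySem.Dict.empty
      = PySem.Dict.counter ((PySem.List.pyRange 1 (n + 1) 1).map pvDigitSum) := by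
    rw [PySem.List.foldl_congr_mem _ _ _ _ hcg,
      ← List.foldl_map (f := pvDigitSum)
        (g := fun (d : PySem.Dict Int Int) s => PySem.Dict.insert d s (PySem.Dict.getD d s 0 + 1))]
    exact PySem.Dict.foldl_insert_getD_add_one_eq_counter _
  unfold lotteryCoupons
  rw [hfold]

lemma countP_eq_range_int (l : List Int) (p : Int → Bool) :
    l.countP p = (List.range l.length).countP (fun j => p (l.getD j 0)) := by
  induction l with
  | nil => simp
  | cons a t ih =>
    rw [List.countP_cons, List.length_cons, List.range_succ_eq_map, List.countP_cons,
      List.countP_map, ih]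
    simp [Function.comp_def]

lemma main_eq (n : Int) (hn : 1 ≤ n) : lotteryCoupons n = lotteryCoupons_alt n := by
  -- ---------- shared frequency function ----------
  set nsums : List Nat := (List.range n.toNat).map (fun k => pvS (k + 1)) with hnsums
  -- ---------- A side ----------
  have hsums : (PySem.List.pyRange 1 (n + 1) 1).map pvDigitSum
      = nsums.map (fun s : Nat => (s : Int)) := by
    rw [PySem.List.pyRange_one, (by ring : (n:Int) + 1 - 1 = n), hnsums]
    rw [List.map_map, List.map_map]
    apply List.map_congr_left
    intro k _
    show pvDigitSum (1 + (k : Int)) = _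
    rw [pvDigitSum_eq (by omega), (by omega : ((1:Int) + (k : Int)).toNat = k + 1)]
    rfl
  have hDgetD : ∀ j : Nat,
      (PySem.Dict.counter ((PySem.List.pyRange 1 (n + 1) 1).map pvDigitSum)).getD (j : Int) 0
        = (nsums.count j : Int) := by
    intro j
    rw [PySem.Dict.getD_counter, hsums,
      List.count_map_of_injective _ _ (fun a b h => by exact_mod_cast h)]
  have hkeys : (PySem.Dict.counter ((PySem.List.pyRange 1 (n + 1) 1).map pvDigitSum)).keys
      = PySem.Set.ofList (nsums.map (fun s : Nat => (s : Int))) := by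
    rw [PySem.Dict.keys_counter, hsums]
  have hvalues : (PySem.Dict.counter ((PySem.List.pyRange 1 (n + 1) 1).map pvDigitSum)).values
      = (PySem.Set.ofList (nsums.map (fun s : Nat => (s : Int)))).map
          (fun k => (PySem.Dict.counter ((PySem.List.pyRange 1 (n + 1) 1).map pvDigitSum)).getD k 0) := by
    rw [← hkeys]
    exact PySem.Dict.values_eq_map_keys _ (PySem.Dict.nodup_keys_counter _) 0
  -- membership facts
  have hmem_keys : ∀ j : Nat,
      ((j : Int) ∈ PySem.Set.ofList (nsums.map (fun s : Nat => (s : Int))) ↔ 0 < nsums.count j) := by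
    intro j
    rw [PySem.Set.mem_ofList, List.mem_map]
    constructor
    · rintro ⟨a, ha, hv⟩
      have : a = j := by exact_mod_cast hv
      subst this
      exact List.count_pos_iff.mpr ha
    · intro h
      exact ⟨j, List.count_pos_iff.mp h, rfl⟩
  have hone : 0 < nsums.count 1 := by
    apply List.count_pos_iff.mpr
    rw [hnsums, List.mem_map]
    refine ⟨0, by simp; omega, ?_⟩
    rw [pvS_small (by omega)]
  -- ---------- B side ----------
  obtain ⟨hblen, hb1, _⟩ := pvPair_spec n.toNat n (by omega) le_rfl
  set g : List Int := (pvPair n).1 with hg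
  set g2 : List Int := g.set 0 (g.getD 0 0 - 1) with hg2
  have hcnt : ∀ j : Nat, pvCnt (n.toNat + 1) j = (if j = 0 then 1 else 0) + nsums.count j := by
    intro j
    rw [pvCnt, List.range_succ_eq_map, List.countP_cons, List.countP_map, hnsums, List.count_eq_countP,
      List.countP_map]
    simp only [Function.comp_def, pvS_zero]
    by_cases hj : j = 0 <;> simp [hj] <;> omega
  have hglen2 : 2 ≤ g.length := by
    by_contra h
    have h0 := hb1 1
    rw [List.getD_eq_default _ _ (by omega)] at h0
    have : 0 < pvCnt (n.toNat + 1) 1 := by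
      rw [hcnt]
      have := hone
      omega
    omega
  have hg2len : g2.length = g.length := by rw [hg2, List.length_set]
  have hF1 : ∀ j : Nat, g2.getD j 0 = (nsums.count j : Int) := by
    intro j
    rw [hg2, getD_set_int _ _ _ _ (by omega)]
    by_cases hj : j = 0
    · rw [if_pos hj, hj, hb1 0, hcnt 0]
      simp
    · rw [if_neg hj, hb1 j, hcnt j, if_neg hj]
      simp
  have hcount_vanish : ∀ j : Nat, g2.length ≤ j → nsums.count j = 0 := by
    intro j hj
    have := hF1 j
    rw [List.getD_eq_default _ _ (by omega)] at this
    exact_mod_cast this.symm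
  have hcount_lt : ∀ j : Nat, 0 < nsums.count j → j < g2.length := by
    intro j h
    by_contra hcon
    have := hcount_vanish j (by omega)
    omega
  have hval_in_g2 : ∀ j : Nat, 0 < nsums.count j → ((nsums.count j : Int)) ∈ g2 := by
    intro j h
    have hj := hcount_lt j h
    rw [← hF1 j, List.getD_eq_getElem _ _ (by simpa using hj)]
    exact List.getElem_mem _
  -- elements of the two value lists
  have hV_elem : ∀ y ∈ (PySem.Dict.counter ((PySem.List.pyRange 1 (n + 1) 1).map pvDigitSum)).values,
      ∃ j : Nat, 0 < nsums.count j ∧ y = (nsums.count j : Int) := by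
    intro y hy
    rw [hvalues, List.mem_map] at hy
    obtain ⟨k, hk, rfl⟩ := hy
    have hk' := hk
    rw [PySem.Set.mem_ofList, List.mem_map] at hk'
    obtain ⟨j, hj, rfl⟩ := hk'
    refine ⟨j, List.count_pos_iff.mpr hj, ?_⟩
    rw [hDgetD j]
  have hV_has : ∀ j : Nat, 0 < nsums.count j →
      ((nsums.count j : Int)) ∈ (PySem.Dict.counter ((PySem.List.pyRange 1 (n + 1) 1).map pvDigitSum)).values := by
    intro j hj
    rw [hvalues, List.mem_map]
    exact ⟨(j : Int), (hmem_keys j).mpr hj, hDgetD j⟩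
  have hg2_elem : ∀ y ∈ g2, ∃ j : Nat, j < g2.length ∧ y = (nsums.count j : Int) := by
    intro y hy
    rw [List.mem_iff_getElem] at hy
    obtain ⟨j, hj, rfl⟩ := hy
    refine ⟨j, hj, ?_⟩
    rw [← hF1 j, List.getD_eq_getElem _ _ (by simpa using hj)]
  -- the two maxima agree
  have hVne : (PySem.Dict.counter ((PySem.List.pyRange 1 (n + 1) 1).map pvDigitSum)).values ≠ [] := by
    intro h
    have := hV_has 1 hone
    rw [h] at this
    simp at this
  have hg2ne : g2 ≠ [] := by
    intro h
    have : g2.length = 0 := by rw [h]; rfl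
    omega
  cases hA : PySem.List.max?
      (PySem.Dict.counter ((PySem.List.pyRange 1 (n + 1) 1).map pvDigitSum)).values (fun v => v) with
  | none => exact absurd ((PySem.List.max?_eq_none_iff _ _).mp hA) hVne
  | some mA =>
  cases hB : PySem.List.max? g2 (fun c => c) with
  | none => exact absurd ((PySem.List.max?_eq_none_iff _ _).mp hB) hg2ne
  | some mB =>
  have hmBpos : 1 ≤ mB := by
    have h1 := PySem.List.max?_isMax hB _ (hval_in_g2 1 hone)
    have : (1 : Int) ≤ (nsums.count 1 : Int) := by exact_mod_cast hone
    omega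
  have hAB : mA = mB := by
    have le1 : mA ≤ mB := by
      obtain ⟨j, hjpos, hje⟩ := hV_elem mA (PySem.List.max?_mem hA)
      rw [hje]
      exact PySem.List.max?_isMax hB _ (hval_in_g2 j hjpos)
    have le2 : mB ≤ mA := by
      obtain ⟨j, hjlt, hje⟩ := hg2_elem mB (PySem.List.max?_mem hB)
      have hjpos : 0 < nsums.count j := by
        by_contra hcon
        have : nsums.count j = 0 := by omega
        rw [hje, this] at hmBpos
        simp at hmBpos
      rw [hje]
      exact PySem.List.max?_isMax hA _ (hV_has j hjpos)
    omega
  -- reduce both sides to countP form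
  rw [lotA_counter n, hA, Option.getD_some, hAB]
  have hAltEq : lotteryCoupons_alt n
      = (g2.countP (fun c => c == (PySem.List.max? g2 (fun c => c)).getD 0) : Int) := rfl
  rw [hAltEq, hB, Option.getD_some]
  -- final counting: both countPs count the set {j | nsums.count j = mB}
  have hcountA : (PySem.Dict.counter ((PySem.List.pyRange 1 (n + 1) 1).map pvDigitSum)).values.countP
        (fun c => c == mB)
      = (PySem.Set.ofList (nsums.map (fun s : Nat => (s : Int)))).countP
          (fun k => (PySem.Dict.counter ((PySem.List.pyRange 1 (n + 1) 1).map pvDigitSum)).getD k 0 == mB) := by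
    rw [hvalues, List.countP_map]
    rfl
  have hcountB : g2.countP (fun c => c == mB)
      = (List.range g2.length).countP (fun j => ((nsums.count j : Int)) == mB) := by
    rw [countP_eq_range_int g2]
    apply List.countP_congr
    intro j hj
    rw [hF1 j]
  rw [hcountA, hcountB]
  -- both are cardinalities of the same finite set (via the cast bijection)
  rw [List.countP_eq_length_filter, List.countP_eq_length_filter]
  have hKnodup : (PySem.Set.ofList (nsums.map (fun s : Nat => (s : Int)))).Nodup :=
    PySem.Set.nodup_ofList _
  have hAnodup := List.Nodup.filter
      (fun k => (PySem.Dict.counter ((PySem.List.pyRange 1 (n + 1) 1).map pvDigitSum)).getD k 0 == mB) hKnodup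
  have hBnodup := List.Nodup.filter (fun j => ((nsums.count j : Int)) == mB) (List.nodup_range (n := g2.length))
  rw [← List.toFinset_card_of_nodup hAnodup, ← List.toFinset_card_of_nodup hBnodup]
  have himg : ((PySem.Set.ofList (nsums.map (fun s : Nat => (s : Int)))).filter
        (fun k => (PySem.Dict.counter ((PySem.List.pyRange 1 (n + 1) 1).map pvDigitSum)).getD k 0 == mB)).toFinset
      = (((List.range g2.length).filter (fun j => ((nsums.count j : Int)) == mB)).toFinset).image
          (fun j : Nat => (j : Int)) := by
    ext x
    simp only [List.mem_toFinset, List.mem_filter, Finset.mem_image, List.mem_range, beq_iff_eq]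
    constructor
    · rintro ⟨hxK, hxv⟩
      have hxK' := hxK
      rw [PySem.Set.mem_ofList, List.mem_map] at hxK'
      obtain ⟨j, hj, rfl⟩ := hxK'
      have hjpos : 0 < nsums.count j := List.count_pos_iff.mpr hj
      refine ⟨j, ⟨?_, ?_⟩, rfl⟩
      · exact hcount_lt j hjpos
      · rw [← hDgetD j]
        exact hxv
    · rintro ⟨j, ⟨hjlt, hjv⟩, rfl⟩
      have hjpos : 0 < nsums.count j := by
        by_contra hcon
        have h0 : nsums.count j = 0 := by omega
        rw [h0] at hjv
        simp at hjv
        omega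
      refine ⟨(hmem_keys j).mpr hjpos, ?_⟩
      rw [hDgetD j]
      exact hjv
  rw [himg, Finset.card_image_of_injective _ (fun a b h => by exact_mod_cast h)]

-- ===== VERDICT (by name: the statement is the Claim_ definition above) =====
theorem lotteryCoupons_spec : Claim_equal_lotteryCoupons := by
  intro n _ hn
  exact main_eq n hn
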